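-- pv_equiv track=rewrite | github.com/shixhaoh/kg-ai-qa | test13.py | split_into_list
-- ===== SOURCE A (Python) =====
-- from typing import Iterator, List
--
-- def split_into_list(input:Iterator[str])->Iterator[List[str]]:
--     buffer = ""
--     for chunk in input:
--         buffer += chunk
--         #遇到叹号需要刷新
--         while "!" in buffer:
--             #找到叹号的位置
--             stop_index = buffer.index("!")
--             #yield用于创造生成器
--             yield [buffer[:stop_index].strip()]
--             buffer  = buffer[stop_index + 1:]
--     #处理buffer最后几个字
--     yield [buffer.strip()]
-- ===== SOURCE B (Python) =====
-- from typing import Iterator, List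
--
-- def split_into_list(input: Iterator[str]) -> Iterator[List[str]]:
--     # One pass: concatenate once, split on '!' once, strip each piece.
--     for piece in "".join(input).split("!"):
--         yield [piece.strip()]
-- ===== Notes on version B (the rewrite author's own statement) =====
-- stated objective: faster
-- what changed: Replaces the incremental buffer with repeated index/slice rescans by a single join of all chunks followed by one split on '!', stripping each piece.
import Mathlib
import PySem

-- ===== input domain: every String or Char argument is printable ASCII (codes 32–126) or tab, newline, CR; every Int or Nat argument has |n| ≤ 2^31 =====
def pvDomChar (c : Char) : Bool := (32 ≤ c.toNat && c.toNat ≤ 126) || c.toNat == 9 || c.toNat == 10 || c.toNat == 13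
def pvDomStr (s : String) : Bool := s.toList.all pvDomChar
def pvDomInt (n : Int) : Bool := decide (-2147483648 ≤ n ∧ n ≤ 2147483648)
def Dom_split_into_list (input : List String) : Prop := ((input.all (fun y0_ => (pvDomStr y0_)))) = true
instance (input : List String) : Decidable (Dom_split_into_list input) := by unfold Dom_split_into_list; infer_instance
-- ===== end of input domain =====

-- B replaces A's incremental buffer with repeated rescans by one join + one split on '!': faster (asymptotic in a timing run).


-- ===== PORT A =====
-- inner 'while "!" in buffer' loop of A: yields the stripped pieces before each '!', returns the leftover buffer
def splitA_while (b : List Char) : List (List String) × List Char :=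
  if h : PySem.Chars.isIn ['!'] b = true then
    let stop := PySem.Chars.find b ['!']
    let r := splitA_while (PySem.Chars.slice b (some (stop + 1)) none)
    ([String.ofList (PySem.Chars.strip (PySem.Chars.slice b none (some stop)))] :: r.1, r.2)
  else ([], b)
termination_by b.length
decreasing_by
  have hinf : ['!'] <:+: b := (PySem.Chars.isIn_iff_infix _ _).1 h
  have hpos : 0 ≤ PySem.Chars.find b ['!'] := (PySem.Chars.find_nonneg_iff _ _).2 hinf
  have hne : b ≠ [] := by
    intro hb; subst hb
    rcases hinf with ⟨s, t, hst⟩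
    simpa using congrArg List.length hst
  simp only [PySem.Chars.slice_eq_listSlice, PySem.List.slice_from _ (by omega : (0:Int) ≤ PySem.Chars.find b ['!'] + 1)]
  have : 1 ≤ (PySem.Chars.find b ['!'] + 1).toNat := by omega
  have hbl : 0 < b.length := List.length_pos_of_ne_nil hne
  simp only [List.length_drop]
  omega

-- one iteration of A's 'for chunk in input' body
def splitA_step (st : List (List String) × List Char) (chunk : String) : List (List String) × List Char :=
  let r := splitA_while (st.2 ++ chunk.toList)
  (st.1 ++ r.1, r.2)

def split_into_list (input : List String) : List (List String) :=
  let st := input.foldl splitA_step ([], [])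
  st.1 ++ [[String.ofList (PySem.Chars.strip st.2)]]

-- ===== PORT B =====
def split_into_list_alt (input : List String) : List (List String) :=
  (List.splitOn '!' (input.map String.toList).flatten).map
    (fun p => [String.ofList (PySem.Chars.strip p)])

-- ===== PRECONDITION & SPEC =====
def Spec_split_into_list (input : List String) (out : List (List String)) : Prop := out = split_into_list_alt input
instance (input : List String) (out : List (List String)) : Decidable (Spec_split_into_list input out) := by unfold Spec_split_into_list; infer_instance

-- ===== CLAIM (what is proved, stated in full; the proofs are below) =====
def Claim_equal_split_into_list : Prop := ∀ (input : List String), Dom_split_into_list input → Spec_split_into_list input (split_into_list input)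

-- ===== LEMMAS AND PROOFS =====

-- yield shape shared by both ports
def pvYield (p : List Char) : List String := [String.ofList (PySem.Chars.strip p)]

theorem splitOn_no_bang (b : List Char) (h : '!' ∉ b) : List.splitOn '!' b = [b] := by
  induction b with
  | nil => rfl
  | cons a t ih =>
    have ha : a ≠ '!' := fun hc => h (by simp [hc])
    have ht := ih (fun hc => h (List.mem_cons_of_mem _ hc))
    simp only [List.splitOn] at ht ⊢
    simp [List.splitOnP_cons, beq_iff_eq, ha, ht]

theorem splitOn_bang (x y : List Char) (h : '!' ∉ x) :
    List.splitOn '!' (x ++ '!' :: y) = x :: List.splitOn '!' y := by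
  induction x with
  | nil => simp only [List.nil_append, List.splitOn, List.splitOnP_cons]; simp
  | cons a t ih =>
    have ha : a ≠ '!' := fun hc => h (by simp [hc])
    have ht : '!' ∉ t := fun hc => h (List.mem_cons_of_mem _ hc)
    have := ih ht
    simp only [List.splitOn] at this ⊢
    simp [List.splitOnP_cons, beq_iff_eq, ha, this]

theorem splitOn_ne_nil (b : List Char) : List.splitOn '!' b ≠ [] :=
  List.splitOnP_ne_nil _ b

theorem splitOn_append (b c : List Char) :
    List.splitOn '!' (b ++ c) =
      (List.splitOn '!' b).dropLast ++
        (((List.splitOn '!' b).getLast?.getD [] ++ (List.splitOn '!' c).headD []) :: (List.splitOn '!' c).tail) := by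
  induction b with
  | nil =>
    rcases List.exists_cons_of_ne_nil (splitOn_ne_nil c) with ⟨h0, t0, hc⟩
    simp only [List.splitOn] at hc ⊢
    simp [List.splitOnP_nil, hc]
  | cons a t ih =>
    by_cases ha : a = '!'
    · subst ha
      have hstep : List.splitOn '!' ('!' :: (t ++ c)) = [] :: List.splitOn '!' (t ++ c) := by
        simp [List.splitOn, List.splitOnP_cons]
      have hstep' : List.splitOn '!' ('!' :: t) = [] :: List.splitOn '!' t := by
        simp [List.splitOn, List.splitOnP_cons]
      rcases List.exists_cons_of_ne_nil (splitOn_ne_nil t) with ⟨h1, t1, htl⟩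
      simp only [List.cons_append, hstep, hstep', ih, htl]
      simp
    · have hstep : List.splitOn '!' (a :: (t ++ c)) =
          List.modifyHead (List.cons a) (List.splitOn '!' (t ++ c)) := by
        simp [List.splitOn, List.splitOnP_cons, beq_iff_eq, ha]
      have hstep' : List.splitOn '!' (a :: t) =
          List.modifyHead (List.cons a) (List.splitOn '!' t) := by
        simp [List.splitOn, List.splitOnP_cons, beq_iff_eq, ha]
      rcases List.exists_cons_of_ne_nil (splitOn_ne_nil t) with ⟨h1, t1, htl⟩
      rcases List.exists_cons_of_ne_nil (splitOn_ne_nil c) with ⟨h0, t0, hc⟩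
      cases t1 with
      | nil =>
        simp only [List.cons_append, hstep, hstep', ih, htl, hc]
        simp
      | cons h2 t2 =>
        simp only [List.cons_append, hstep, hstep', ih, htl, hc]
        simp

-- every piece of a splitOn result is '!'-free
theorem splitOn_pieces_no_bang (b : List Char) :
    ∀ p ∈ List.splitOn '!' b, '!' ∉ p := by
  induction b with
  | nil => intro p hp; simp [List.splitOn, List.splitOnP_nil] at hp; simp [hp]
  | cons a t ih =>
    intro p hp
    by_cases ha : a = '!'
    · subst ha
      have : List.splitOn '!' ('!' :: t) = [] :: List.splitOn '!' t := by
        simp [List.splitOn, List.splitOnP_cons]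
      rw [this] at hp
      rcases List.mem_cons.1 hp with hp | hp
      · simp [hp]
      · exact ih p hp
    · have hstep : List.splitOn '!' (a :: t) =
          List.modifyHead (List.cons a) (List.splitOn '!' t) := by
        simp [List.splitOn, List.splitOnP_cons, beq_iff_eq, ha]
      rcases List.exists_cons_of_ne_nil (splitOn_ne_nil t) with ⟨h1, t1, htl⟩
      rw [hstep, htl, List.modifyHead_cons] at hp
      rcases List.mem_cons.1 hp with hp | hp
      · subst hp
        intro hm
        rcases List.mem_cons.1 hm with h' | h'
        · exact ha h'.symm
        · exact ih h1 (htl ▸ List.mem_cons_self) h'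
      · exact ih p (htl ▸ List.mem_cons_of_mem _ hp) 

-- the last piece is '!'-free
theorem splitOn_last_no_bang (b : List Char) : '!' ∉ (List.splitOn '!' b).getLast?.getD [] := by
  rcases List.exists_cons_of_ne_nil (splitOn_ne_nil b) with ⟨h0, t0, hb⟩
  have := splitOn_pieces_no_bang b ((h0 :: t0).getLast (by simp)) (by rw [hb]; exact List.getLast_mem _)
  rw [hb]
  simpa [List.getLastD_eq_getLast?, List.getLast?_eq_some_getLast (by simp : h0 :: t0 ≠ [])] using this

-- structure of b at the first '!' found by Chars.find
theorem find_structure (b : List Char) (h : PySem.Chars.isIn ['!'] b = true) :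
    b = b.take (PySem.Chars.find b ['!']).toNat ++ '!' :: b.drop ((PySem.Chars.find b ['!']).toNat + 1) ∧
      '!' ∉ b.take (PySem.Chars.find b ['!']).toNat := by
  have hinf : ['!'] <:+: b := (PySem.Chars.isIn_iff_infix _ _).1 h
  have hpos : 0 ≤ PySem.Chars.find b ['!'] := (PySem.Chars.find_nonneg_iff _ _).2 hinf
  obtain ⟨hpre, hmin⟩ := PySem.Chars.find_spec hpos
  set k := (PySem.Chars.find b ['!']).toNat with hk
  rcases hpre with ⟨t, ht⟩
  have hklen : k ≤ b.length := by
    have := PySem.Chars.find_le_length b ['!']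
    omega
  constructor
  · have hdk : b.drop k = '!' :: t := by rw [← ht]; rfl
    have hdk1 : b.drop (k + 1) = t := by
      have := congrArg List.tail hdk
      simpa [List.tail_drop] using this
    rw [hdk1, ← hdk, List.take_append_drop]
  · intro hm
    rcases List.mem_iff_getElem.1 hm with ⟨i, hi, hgi⟩
    have hilen : i < k := by simpa [List.length_take, hklen] using hi
    apply hmin i hilen
    have hib : i < b.length := by omega
    have hbi : b[i] = '!' := by
      have : (b.take k)[i] = b[i] := List.getElem_take
      rw [← this]; exact hgi
    refine ⟨b.drop (i+1), ?_⟩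
    have : b.drop i = b[i] :: b.drop (i+1) := List.drop_eq_getElem_cons hib
    simp [this, hbi]

-- the inner while-loop equals: all but the last splitOn piece yielded, last piece kept
theorem splitA_while_spec (b : List Char) :
    splitA_while b =
      ((List.splitOn '!' b).dropLast.map pvYield, (List.splitOn '!' b).getLast?.getD []) := by
  by_cases h : PySem.Chars.isIn ['!'] b = true
  · have hinf : ['!'] <:+: b := (PySem.Chars.isIn_iff_infix _ _).1 h
    have hpos : 0 ≤ PySem.Chars.find b ['!'] := (PySem.Chars.find_nonneg_iff _ _).2 hinf
    obtain ⟨hsplit, hnb⟩ := find_structure b h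
    set k := (PySem.Chars.find b ['!']).toNat with hk
    have hslice1 : PySem.Chars.slice b (some (PySem.Chars.find b ['!'] + 1)) none = b.drop (k + 1) := by
      rw [PySem.Chars.slice_eq_listSlice, PySem.List.slice_from _ (by omega)]
      congr 1
      omega
    have hslice2 : PySem.Chars.slice b none (some (PySem.Chars.find b ['!'])) = b.take k := by
      rw [PySem.Chars.slice_eq_listSlice, PySem.List.slice_to _ hpos]
    have hS : List.splitOn '!' b = b.take k :: List.splitOn '!' (b.drop (k + 1)) := by
      conv_lhs => rw [hsplit]
      exact splitOn_bang _ _ hnb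
    have ih := splitA_while_spec (b.drop (k + 1))
    rw [splitA_while]
    simp only [h, dif_pos, hslice1, hslice2, ih, hS]
    rcases List.exists_cons_of_ne_nil (splitOn_ne_nil (b.drop (k + 1))) with ⟨h0, t0, hd⟩
    simp [hd, pvYield]
  · have hnb : '!' ∉ b := by
      intro hm
      apply h
      rw [PySem.Chars.isIn_iff_infix]
      rcases List.mem_iff_append.1 hm with ⟨s, t, hst⟩
      exact ⟨s, t, by simp [hst]⟩
    rw [splitA_while]
    simp [h, splitOn_no_bang b hnb]
termination_by b.length
decreasing_by
  have hne : b ≠ [] := by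
    intro hb; subst hb
    rcases hinf with ⟨s, t, hst⟩
    simpa using congrArg List.length hst
  have hbl : 0 < b.length := List.length_pos_of_ne_nil hne
  simp only [List.length_drop]
  omega

-- the fold over chunks, from an '!'-free buffer
theorem fold_spec (cs : List String) : ∀ (acc : List (List String)) (buf : List Char),
    '!' ∉ buf →
    cs.foldl splitA_step (acc, buf) =
      (acc ++ (List.splitOn '!' (buf ++ (cs.map String.toList).flatten)).dropLast.map pvYield,
        (List.splitOn '!' (buf ++ (cs.map String.toList).flatten)).getLast?.getD []) := by
  induction cs with
  | nil =>
    intro acc buf hnb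
    simp [splitOn_no_bang buf hnb]
  | cons c cs ih =>
    intro acc buf hnb
    simp only [List.foldl_cons, splitA_step]
    rw [splitA_while_spec (buf ++ c.toList)]
    set bc := buf ++ c.toList with hbc
    have hnb' : '!' ∉ (List.splitOn '!' bc).getLast?.getD [] := splitOn_last_no_bang bc
    rw [ih _ _ hnb']
    simp only [Prod.mk.injEq]
    have hkey : List.splitOn '!' (bc ++ (cs.map String.toList).flatten) =
        (List.splitOn '!' bc).dropLast ++
          List.splitOn '!' ((List.splitOn '!' bc).getLast?.getD [] ++ (cs.map String.toList).flatten) := by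
      rw [splitOn_append bc, splitOn_append ((List.splitOn '!' bc).getLast?.getD []),
        splitOn_no_bang _ hnb']
      simp
    have hne2 : List.splitOn '!'
        ((List.splitOn '!' bc).getLast?.getD [] ++ (cs.map String.toList).flatten) ≠ [] := splitOn_ne_nil _
    constructor
    · simp only [List.map_cons, List.flatten_cons, ← List.append_assoc, ← hbc, hkey]
      rw [List.dropLast_append_of_ne_nil hne2]
      simp
    · simp only [List.map_cons, List.flatten_cons, ← List.append_assoc, ← hbc, hkey]
      rw [List.getLast?_append_of_ne_nil _ hne2]

-- ===== VERDICT (by name: the statement is the Claim_ definition above) =====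
theorem split_into_list_spec : Claim_equal_split_into_list := by
  intro input _
  unfold Spec_split_into_list split_into_list split_into_list_alt
  have := fold_spec input [] []
  simp only [List.not_mem_nil, not_false_iff, List.nil_append] at this
  rw [this (by simp)]
  simp only []
  set S := List.splitOn '!' (input.map String.toList).flatten with hS
  have hne : S ≠ [] := splitOn_ne_nil _
  have : S.dropLast ++ [S.getLast?.getD []] = S := by
    rcases List.exists_cons_of_ne_nil hne with ⟨h0, t0, hd⟩
    rw [hd, List.getLast?_eq_some_getLast (by simp : h0 :: t0 ≠ [])]
    simp [List.dropLast_append_getLast]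
  calc S.dropLast.map pvYield ++ [[String.ofList (PySem.Chars.strip (S.getLast?.getD []))]]
      = S.dropLast.map pvYield ++ [pvYield (S.getLast?.getD [])] := rfl
    _ = (S.dropLast ++ [S.getLast?.getD []]).map pvYield := by simp
    _ = S.map pvYield := by rw [this]
    _ = S.map (fun p => [String.ofList (PySem.Chars.strip p)]) := rfl
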